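-- pv_equiv track=rewrite | github.com/inpho/topic-explorer | topicexplorer/analysis/epoch.py | generate_epochs
-- ===== SOURCE A (Python) =====
-- from typing import Iterator, List, Sequence
--
-- def generate_epochs(N: int, dates: Sequence,
--                     start: List[int]=None, limit: int=365) -> Iterator[List[int]]:
--     if start is None:
--         start = [0]
--
--     if N <= 1:
--         if (dates[start[-1]] <= (dates[-1] - limit)
--            and start[-1] + 1 < len(dates)):
--             e = start[:]
--             e.append(len(dates))
--             yield e[:]
--     else:
--         for i in range(start[-1]+2,len(dates)):
--             if (dates[i] >= (dates[start[-1]] + limit)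
--                 and dates[i] <= (dates[-1] - limit)):
--                 e = start[:]
--                 e.append(i)
--                 for epoch in generate_epochs(N-1, dates, e, limit=limit):
--                     yield epoch[:]
-- ===== SOURCE B (Python) =====
-- def generate_epochs(N, dates, start=None, limit=365):
--     # Breadth-first: iteratively expand the list of partial boundary prefixes
--     # level by level instead of recursing depth-first; order is preserved.
--     if start is None:
--         start = [0]
--     partials = [start[:]]
--     for _ in range(N - 1):
--         if not partials:
--             break
--         partials = [p + [i]
--                     for p in partials
--                     for i in range(p[-1] + 2, len(dates))
--                     if dates[i] >= dates[p[-1]] + limit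
--                     and dates[i] <= dates[-1] - limit]
--     for p in partials:
--         if dates[p[-1]] <= dates[-1] - limit and p[-1] + 1 < len(dates):
--             yield p + [len(dates)]
-- ===== Notes on version B (the rewrite author's own statement) =====
-- stated objective: alternative
-- what changed: Replaces A's depth-first recursive generator with an iterative breadth-first construction: a single loop expands the whole list of partial boundary prefixes level by level (N-1 times) and a final pass filters and emits them, preserving A's exact yield order.
import Mathlib
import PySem

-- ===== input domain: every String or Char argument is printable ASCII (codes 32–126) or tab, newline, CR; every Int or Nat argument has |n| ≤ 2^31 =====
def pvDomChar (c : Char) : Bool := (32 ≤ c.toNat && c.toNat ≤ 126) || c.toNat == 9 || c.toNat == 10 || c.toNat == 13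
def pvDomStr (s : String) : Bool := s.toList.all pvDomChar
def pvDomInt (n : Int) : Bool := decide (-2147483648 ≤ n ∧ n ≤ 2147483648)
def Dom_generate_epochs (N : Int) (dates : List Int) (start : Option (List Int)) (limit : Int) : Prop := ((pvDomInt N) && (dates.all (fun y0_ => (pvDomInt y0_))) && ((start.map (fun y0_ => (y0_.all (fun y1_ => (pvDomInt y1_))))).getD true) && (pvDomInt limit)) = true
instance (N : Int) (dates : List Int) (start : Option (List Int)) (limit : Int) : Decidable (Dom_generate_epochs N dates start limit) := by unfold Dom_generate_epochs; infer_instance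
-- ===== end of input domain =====

-- B replaces A's depth-first recursive generator by an iterative level-by-level expansion of
-- all partial boundary prefixes, with the same yield order (objective: alternative
-- decomposition). Both ports return the list of the generator's yields.

-- ===== PORT A =====
-- literal transliteration of A: recursive generator, `for i in range(...)` as a foldl
-- accumulating the yields; xs[-1] / dates[j] via PySem.List.pyGetD (in range under Pre_).
def generate_epochs (N : Int) (dates : List Int) (start : Option (List Int)) (limit : Int) : List (List Int) :=
  let s := start.getD [0]
  let L : Int := (dates.length : Int)
  if _h : N ≤ 1 then
    if PySem.List.pyGetD dates (PySem.List.pyGetD s (-1) 0) 0 ≤ PySem.List.pyGetD dates (-1) 0 - limit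
        ∧ PySem.List.pyGetD s (-1) 0 + 1 < L then
      [s ++ [L]]
    else []
  else
    (PySem.List.pyRange (PySem.List.pyGetD s (-1) 0 + 2) L 1).foldl
      (fun acc i =>
        if PySem.List.pyGetD dates i 0 ≥ PySem.List.pyGetD dates (PySem.List.pyGetD s (-1) 0) 0 + limit
            ∧ PySem.List.pyGetD dates i 0 ≤ PySem.List.pyGetD dates (-1) 0 - limit then
          acc ++ generate_epochs (N - 1) dates (some (s ++ [i])) limit
        else acc) []
termination_by N.toNat
decreasing_by omega

-- ===== PORT B =====
-- one level of Source B's comprehension: extend every partial prefix by every admissible next index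
def pvExpand (dates : List Int) (limit : Int) (ps : List (List Int)) : List (List Int) :=
  ps.flatMap (fun p =>
    ((PySem.List.pyRange (PySem.List.pyGetD p (-1) 0 + 2) (dates.length : Int) 1).filter
        (fun i => decide (PySem.List.pyGetD dates i 0 ≥ PySem.List.pyGetD dates (PySem.List.pyGetD p (-1) 0) 0 + limit
            ∧ PySem.List.pyGetD dates i 0 ≤ PySem.List.pyGetD dates (-1) 0 - limit))).map
      (fun i => p ++ [i]))

-- Source B's `for _ in range(N-1): if not partials: break; partials = [...]` loop
def pvLevels (dates : List Int) (limit : Int) : Nat → List (List Int) → List (List Int)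
  | 0, ps => ps
  | n + 1, ps => if ps.isEmpty then ps else pvLevels dates limit n (pvExpand dates limit ps)

def generate_epochs_alt (N : Int) (dates : List Int) (start : Option (List Int)) (limit : Int) : List (List Int) :=
  let s := start.getD [0]
  let L : Int := (dates.length : Int)
  let partials := pvLevels dates limit (N - 1).toNat [s]
  (partials.filter (fun p =>
      decide (PySem.List.pyGetD dates (PySem.List.pyGetD p (-1) 0) 0 ≤ PySem.List.pyGetD dates (-1) 0 - limit
          ∧ PySem.List.pyGetD p (-1) 0 + 1 < L))).map (fun p => p ++ [L])

-- ===== PRECONDITION & SPEC =====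
-- Pre_ excludes exactly the inputs on which A raises IndexError: an empty start list, or a
-- start index that puts one of the evaluated subscripts out of Python's (negative-aware) range.
def Pre_generate_epochs (N : Int) (dates : List Int) (start : Option (List Int)) (limit : Int) : Prop :=
  start.getD [0] ≠ [] ∧
  (if N ≤ 1 then
    -(dates.length : Int) ≤ (start.getD [0]).getLastD 0 ∧ (start.getD [0]).getLastD 0 < (dates.length : Int)
  else
    ((start.getD [0]).getLastD 0 + 2 < (dates.length : Int) → -(dates.length : Int) ≤ (start.getD [0]).getLastD 0))
instance (N : Int) (dates : List Int) (start : Option (List Int)) (limit : Int) : Decidable (Pre_generate_epochs N dates start limit) := by unfold Pre_generate_epochs; infer_instance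

def pvWitness_generate_epochs : Int × List Int × Option (List Int) × Int := (2, [0, 400, 800, 1200], none, 365)

def Spec_generate_epochs (N : Int) (dates : List Int) (start : Option (List Int)) (limit : Int) (out : List (List Int)) : Prop := out = generate_epochs_alt N dates start limit
instance (N : Int) (dates : List Int) (start : Option (List Int)) (limit : Int) (out : List (List Int)) : Decidable (Spec_generate_epochs N dates start limit out) := by unfold Spec_generate_epochs; infer_instance

-- ===== CLAIM (what is proved, stated in full; the proofs are below) =====
def Claim_equal_generate_epochs : Prop := ∀ (N : Int) (dates : List Int) (start : Option (List Int)) (limit : Int), Dom_generate_epochs N dates start limit → Pre_generate_epochs N dates start limit → Spec_generate_epochs N dates start limit (generate_epochs N dates start limit)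

-- ===== LEMMAS AND PROOFS =====

theorem pv_iter_nil (dates : List Int) (limit : Int) (n : Nat) :
    (pvExpand dates limit)^[n] ([] : List (List Int)) = [] := by
  induction n with
  | zero => rfl
  | succ n ih => simp [Function.iterate_succ_apply, pvExpand, ih]

-- the early-exit level loop computes exactly n-fold expansion
theorem pvLevels_eq_iter (dates : List Int) (limit : Int) : ∀ (n : Nat) (ps : List (List Int)),
    pvLevels dates limit n ps = (pvExpand dates limit)^[n] ps := by
  intro n
  induction n with
  | zero => intro ps; rfl
  | succ n ih =>
      intro ps
      by_cases h : ps.isEmpty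
      · rw [List.isEmpty_iff] at h
        simp [pvLevels, h, pv_iter_nil]
      · simp [pvLevels, h, ih, Function.iterate_succ_apply]

theorem pvExpand_append (dates : List Int) (limit : Int) (a b : List (List Int)) :
    pvExpand dates limit (a ++ b) = pvExpand dates limit a ++ pvExpand dates limit b := by
  simp [pvExpand]

-- B's final pass (filter the surviving prefixes and close them with len(dates))
def pvFin (dates : List Int) (limit : Int) (ps : List (List Int)) : List (List Int) :=
  (ps.filter (fun p =>
      decide (PySem.List.pyGetD dates (PySem.List.pyGetD p (-1) 0) 0 ≤ PySem.List.pyGetD dates (-1) 0 - limit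
          ∧ PySem.List.pyGetD p (-1) 0 + 1 < (dates.length : Int)))).map (fun p => p ++ [(dates.length : Int)])

theorem pv_iter_append (dates : List Int) (limit : Int) (n : Nat) :
    ∀ (a b : List (List Int)),
      (pvExpand dates limit)^[n] (a ++ b) = (pvExpand dates limit)^[n] a ++ (pvExpand dates limit)^[n] b := by
  induction n with
  | zero => intro a b; rfl
  | succ n ih => intro a b; simp [Function.iterate_succ_apply, pvExpand_append, ih]

-- B's pipeline is a homomorphism on the seed list: it acts seed by seed
theorem pv_Fhom (dates : List Int) (limit : Int) (n : Nat) :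
    ∀ (qs : List (List Int)),
      pvFin dates limit ((pvExpand dates limit)^[n] qs)
        = qs.flatMap (fun q => pvFin dates limit ((pvExpand dates limit)^[n] [q])) := by
  intro qs
  induction qs with
  | nil =>
      simp [pv_iter_nil, pvFin]
  | cons q rest ih =>
      have : (q :: rest) = [q] ++ rest := rfl
      rw [this, pv_iter_append]
      simp only [List.flatMap_append, List.flatMap_cons, List.flatMap_nil, List.append_nil, ← ih]
      simp [pvFin]

theorem pv_alt_eq (N : Int) (dates : List Int) (start : Option (List Int)) (limit : Int) :
    generate_epochs_alt N dates start limit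
      = pvFin dates limit ((pvExpand dates limit)^[(N - 1).toNat] [start.getD [0]]) := by
  simp only [generate_epochs_alt, pvFin, pvLevels_eq_iter]

theorem pv_main (dates : List Int) (limit : Int) :
    ∀ (n : Nat) (N : Int) (start : Option (List Int)), (N - 1).toNat = n →
      generate_epochs N dates start limit = generate_epochs_alt N dates start limit := by
  intro n
  induction n with
  | zero =>
      intro N start hn
      have hN : N ≤ 1 := by omega
      rw [pv_alt_eq, hn, generate_epochs]
      simp only [dif_pos hN, Function.iterate_zero, id_eq, pvFin]
      by_cases hc : (PySem.List.pyGetD dates (PySem.List.pyGetD (start.getD [0]) (-1) 0) 0 ≤ PySem.List.pyGetD dates (-1) 0 - limit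
          ∧ PySem.List.pyGetD (start.getD [0]) (-1) 0 + 1 < (dates.length : Int)) <;>
        simp [hc]
  | succ n ih =>
      intro N start hn
      have hN : ¬ N ≤ 1 := by omega
      have hN1 : (N - 1 - 1).toNat = n := by omega
      rw [pv_alt_eq, hn, generate_epochs]
      simp only [dif_neg hN]
      rw [PySem.List.foldl_ite_eq_foldl_filter, PySem.List.foldl_append_eq_flatMap]
      rw [Function.iterate_succ_apply, pv_Fhom]
      have hexp : pvExpand dates limit [start.getD [0]]
          = ((PySem.List.pyRange (PySem.List.pyGetD (start.getD [0]) (-1) 0 + 2) (dates.length : Int) 1).filter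
              (fun i => decide (PySem.List.pyGetD dates i 0 ≥ PySem.List.pyGetD dates (PySem.List.pyGetD (start.getD [0]) (-1) 0) 0 + limit
                  ∧ PySem.List.pyGetD dates i 0 ≤ PySem.List.pyGetD dates (-1) 0 - limit))).map
            (fun i => start.getD [0] ++ [i]) := by
        simp [pvExpand]
      rw [hexp, List.flatMap_map]
      simp only [List.nil_append]
      refine List.flatMap_congr ?_
      intro i hi
      rw [ih (N - 1) (some (start.getD [0] ++ [i])) hN1, pv_alt_eq, hN1]
      rfl

-- ===== VERDICT (by name: the statement is the Claim_ definition above) =====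
theorem generate_epochs_spec : Claim_equal_generate_epochs := by
  intro N dates start limit _ _
  unfold Spec_generate_epochs
  exact pv_main dates limit (N - 1).toNat N start rfl
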